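-- pv_equiv track=rewrite | github.com/ketan86/interview_material | lc_algorithm/company/karat/badged_access_time.py | find_employee
-- ===== SOURCE A (Python) =====
-- from collections import defaultdict
-- import heapq
--
-- def find_employee(badge_times):
--     result = {}
--     if not badge_times:
--         return result
--     # employee name and min_heap
--     employee_map = defaultdict(list)
--
--     # sort badge_times
--     badge_times.sort()
--
--     for badge_time in badge_times:
--         employee, time = badge_time
--         # To return the first period where 3 or more times badges were scanned,
--         # we are using this condition but it also limits the number of entries
--         # in the first match to 3 which is not expected.
--         # ???
--         if len(employee_map[employee]) < 3:
--             while employee_map[employee] and time - employee_map[employee][0] > 100: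
--                 heapq.heappop(employee_map[employee])
--             heapq.heappush(employee_map[employee], time)
--
--     for employee, min_heap in employee_map.items():
--         if len(min_heap) >= 3:
--             result[employee] = min_heap
--
--     return result
-- ===== SOURCE B (Python) =====
-- def find_employee(badge_times):
--     # Same return value as the original; also sorts badge_times in place like it.
--     badge_times.sort()
--     groups = {}
--     for name, t in badge_times:
--         groups.setdefault(name, []).append(t)
--     result = {}
--     for name, ts in groups.items():
--         for a, b, c in zip(ts, ts[1:], ts[2:]):
--             if c - a <= 100:
--                 result[name] = [a, b, c]
--                 break
--     return result
-- ===== Notes on version B (the rewrite author's own statement) =====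
-- stated objective: simpler
-- what changed: Replaces A's interleaved defaultdict-of-heaps loop (heappush/heappop with a size-3 gate per badge scan) by grouping each employee's times after the sort and returning the first consecutive triple (a,b,c) with c-a<=100 found by a direct zip scan.
import Mathlib
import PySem

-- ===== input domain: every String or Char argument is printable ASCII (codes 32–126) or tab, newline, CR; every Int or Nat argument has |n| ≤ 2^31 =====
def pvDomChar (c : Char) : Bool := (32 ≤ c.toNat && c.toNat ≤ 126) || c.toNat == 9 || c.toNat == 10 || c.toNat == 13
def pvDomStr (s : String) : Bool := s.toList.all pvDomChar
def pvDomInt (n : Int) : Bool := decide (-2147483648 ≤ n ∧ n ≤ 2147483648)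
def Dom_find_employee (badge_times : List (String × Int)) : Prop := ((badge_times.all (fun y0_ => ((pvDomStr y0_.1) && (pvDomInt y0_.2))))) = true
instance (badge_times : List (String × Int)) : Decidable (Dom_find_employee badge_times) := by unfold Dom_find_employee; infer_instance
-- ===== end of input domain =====

-- B replaces A's interleaved defaultdict-of-heaps loop by group-then-first-triple scan (objective: simpler).
-- Both A and B sort badge_times in place; the equivalence proved here is about the return value.

-- ===== PORT A =====

-- heapq.heappop, hand-ported.  Exact for heaps of ≤ 3 elements; in this program every heap
-- holds at most 3 elements (pushes are gated by `len < 3`), and pops only happen at size ≤ 2.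
def heappopA : List Int → List Int
  | [] => []            -- Python raises IndexError here; unreachable: the while loop guards on nonempty
  | [_] => []
  | [_, b] => [b]
  | _ :: b :: c :: rest => if c < b then c :: b :: rest else b :: c :: rest

-- (used by popLoopA's termination proof)
theorem heappopA_length (x : Int) (rest : List Int) :
    (heappopA (x :: rest)).length = rest.length := by
  match rest with
  | [] => rfl
  | [_] => rfl
  | b :: c :: r => simp only [heappopA]; split <;> simp

-- the `while employee_map[employee] and time - employee_map[employee][0] > 100: heappop(...)` loop
def popLoopA (time : Int) : List Int → List Int
  | [] => []
  | x :: rest => if 100 < time - x then popLoopA time (heappopA (x :: rest)) else x :: rest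
  termination_by h => h.length
  decreasing_by rw [heappopA_length]; simp

-- heapq.heappush, hand-ported.  Exact for heaps of ≤ 2 elements; in this program every push
-- happens on a heap of at most 2 elements (gated by `len < 3`).
def heappushA (heap : List Int) (item : Int) : List Int :=
  match heap with
  | [] => [item]
  | [a] => if item < a then [item, a] else [a, item]
  | [a, b] => if item < a then [item, b, a] else [a, b, item]
  | _ => heap ++ [item]   -- unreachable in this program (never pushes on a heap of ≥ 3)

def find_employee (badge_times : List (String × Int)) : List (String × List Int) :=
  let result : PySem.Dict String (List Int) := PySem.Dict.empty
  if badge_times = [] then result.items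
  else
    -- badge_times.sort(): pairs compare lexicographically
    let sorted_bt := PySem.List.sorted2 badge_times (fun p => p.1) (fun p => p.2)
    let emap := sorted_bt.foldl (fun m bt =>
      let employee := bt.1
      let time := bt.2
      let h := m.getD employee []                                        -- employee_map[employee]
      let m1 := if m.contains employee then m else m.insert employee []  -- defaultdict inserts [] when absent
      if h.length < 3 then m1.insert employee (heappushA (popLoopA time h) time) else m1)
      PySem.Dict.empty
    (emap.items.foldl (fun r p => if 3 ≤ p.2.length then r.insert p.1 p.2 else r) result).items

-- ===== PORT B =====

-- the inner `for a, b, c in zip(ts, ts[1:], ts[2:]): if c - a <= 100: … break` loop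
def firstTriple : List Int → Option (List Int)
  | a :: b :: c :: rest => if c - a ≤ 100 then some [a, b, c] else firstTriple (b :: c :: rest)
  | _ => none
  termination_by l => l.length

def find_employee_alt (badge_times : List (String × Int)) : List (String × List Int) :=
  let s := PySem.List.sorted2 badge_times (fun p => p.1) (fun p => p.2)   -- badge_times.sort()
  let groups := s.foldl (fun g p => g.modify p.1 [] (fun ts => ts ++ [p.2])) PySem.Dict.empty
  (groups.items.foldl (fun r p =>
      match firstTriple p.2 with
      | some w => r.insert p.1 w
      | none => r) PySem.Dict.empty).items

-- ===== PRECONDITION & SPEC =====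
def Spec_find_employee (badge_times : List (String × Int)) (out : List (String × List Int)) : Prop := out = find_employee_alt badge_times
instance (badge_times : List (String × Int)) (out : List (String × List Int)) : Decidable (Spec_find_employee badge_times out) := by unfold Spec_find_employee; infer_instance

-- ===== CLAIM (what is proved, stated in full; the proofs are below) =====
def Claim_equal_find_employee : Prop := ∀ (badge_times : List (String × Int)), Dom_find_employee badge_times → Spec_find_employee badge_times (find_employee badge_times)

-- ===== LEMMAS AND PROOFS =====

-- A's per-badge heap update, and its fold over a list of times
def stepH (h : List Int) (t : Int) : List Int :=
  if h.length < 3 then heappushA (popLoopA t h) t else h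

def runH (h : List Int) (ts : List Int) : List Int := ts.foldl stepH h

-- the times of employee k, in order, in the list s
def grpT (s : List (String × Int)) (k : String) : List Int :=
  (s.filter (fun p => p.1 == k)).map (fun p => p.2)

-- relation between A's final heap and B's first-triple result
def QH (h : List Int) : Option (List Int) → Prop
  | some w => h = w
  | none => h.length ≤ 2

theorem runH_frozen (ts : List Int) (h : List Int) (hl : h.length = 3) : runH h ts = h := by
  induction ts with
  | nil => rfl
  | cons t ts ih =>
    show runH (stepH h t) ts = h
    have : stepH h t = h := by unfold stepH; rw [hl]; simp
    rw [this, ih]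

theorem firstTriple_cons (a b c : Int) (rest : List Int) :
    firstTriple (a :: b :: c :: rest) =
      if c - a ≤ 100 then some [a, b, c] else firstTriple (b :: c :: rest) := by
  rw [firstTriple]

theorem firstTriple_short (ts : List Int) (h : ts.length ≤ 2) : firstTriple ts = none := by
  match ts, h with
  | [], _ => rw [firstTriple]; intro _ _ _ _ hh; cases hh
  | [a], _ => rw [firstTriple]; intro _ _ _ _ hh; cases hh
  | [a, b], _ => rw [firstTriple]; intro _ _ _ _ hh; cases hh

theorem firstTriple_some_length (ts : List Int) (w : List Int)
    (h : firstTriple ts = some w) : w.length = 3 := by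
  fun_induction firstTriple ts with
  | case1 a b c rest hle => simp at h; simp [← h]
  | case2 a b c rest hle ih => exact ih h
  | case3 l hne => cases h

theorem firstTriple_skip (a c : Int) (rest : List Int) (hca : 100 < c - a)
    (hc : ∀ r ∈ rest, c ≤ r) : firstTriple (a :: c :: rest) = firstTriple (c :: rest) := by
  cases rest with
  | nil => rw [firstTriple_short _ (by simp), firstTriple_short _ (by simp)]
  | cons r0 rest' =>
    have := hc r0 (by simp)
    rw [firstTriple_cons, if_neg (by omega)]

theorem core (ts : List Int) :
    (∀ a, (a :: ts).Pairwise (· ≤ ·) → QH (runH [a] ts) (firstTriple (a :: ts))) ∧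
    (∀ a b, (a :: b :: ts).Pairwise (· ≤ ·) → QH (runH [a, b] ts) (firstTriple (a :: b :: ts))) := by
  induction ts with
  | nil =>
    constructor
    · intro a _; rw [firstTriple_short _ (by simp)]; simp [QH, runH]
    · intro a b _; rw [firstTriple_short _ (by simp)]; simp [QH, runH]
  | cons c rest ih =>
    constructor
    · -- heap [a]
      intro a hp
      have hac : a ≤ c := (List.pairwise_cons.mp hp).1 c (by simp)
      have step1 : runH [a] (c :: rest) =
          if 100 < c - a then runH [c] rest else runH [a, c] rest := by
        show runH (stepH [a] c) rest = _
        unfold stepH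
        rw [if_pos (by simp : ([a] : List Int).length < 3)]
        unfold popLoopA
        by_cases hca : 100 < c - a
        · rw [if_pos hca, if_pos hca]
          show runH (heappushA (popLoopA c []) c) rest = _
          simp [popLoopA, heappushA]
        · rw [if_neg hca, if_neg hca]
          simp [heappushA, not_lt.mpr hac]
      rw [step1]
      by_cases hca : 100 < c - a
      · rw [if_pos hca]
        have hcrest : ∀ r ∈ rest, c ≤ r := (List.pairwise_cons.mp (List.Pairwise.sublist (by simp) hp)).1
        rw [firstTriple_skip a c rest hca hcrest]
        exact ih.1 c (List.Pairwise.sublist (by simp) hp)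
      · rw [if_neg hca]
        exact ih.2 a c hp
    · -- heap [a, b]
      intro a b hp
      have hab : a ≤ b := (List.pairwise_cons.mp hp).1 b (by simp)
      have hbc : b ≤ c := (List.pairwise_cons.mp (List.pairwise_cons.mp hp).2).1 c (by simp)
      have hstep : runH [a, b] (c :: rest) =
          if 100 < c - a then (if 100 < c - b then runH [c] rest else runH [b, c] rest)
          else runH [a, b, c] rest := by
        show runH (stepH [a, b] c) rest = _
        unfold stepH
        rw [if_pos (by simp : ([a, b] : List Int).length < 3)]
        unfold popLoopA
        by_cases hca : 100 < c - a
        · rw [if_pos hca, if_pos hca]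
          show runH (heappushA (popLoopA c [b]) c) rest = _
          unfold popLoopA
          by_cases hcb : 100 < c - b
          · rw [if_pos hcb, if_pos hcb]
            show runH (heappushA (popLoopA c []) c) rest = _
            simp [popLoopA, heappushA]
          · rw [if_neg hcb, if_neg hcb]
            simp [heappushA, not_lt.mpr hbc]
        · rw [if_neg hca, if_neg hca]
          show runH (if c < a then [c, b, a] else [a, b, c]) rest = _
          rw [if_neg (show ¬ c < a by omega)]
      rw [hstep]
      by_cases hca : 100 < c - a
      · have hft : firstTriple (a :: b :: c :: rest) = firstTriple (b :: c :: rest) := by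
          rw [firstTriple_cons, if_neg (by omega)]
        rw [if_pos hca, hft]
        by_cases hcb : 100 < c - b
        · rw [if_pos hcb]
          have hcrest : ∀ r ∈ rest, c ≤ r :=
            (List.pairwise_cons.mp (List.Pairwise.sublist (by simp) hp)).1
          rw [firstTriple_skip b c rest hcb hcrest]
          exact ih.1 c (List.Pairwise.sublist (by simp) hp)
        · rw [if_neg hcb]
          exact ih.2 b c (List.Pairwise.sublist (by simp) hp)
      · have hft : firstTriple (a :: b :: c :: rest) = some [a, b, c] := by
          rw [firstTriple_cons, if_pos (by omega)]
        rw [if_neg hca, hft]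
        show runH [a, b, c] rest = [a, b, c]
        exact runH_frozen rest [a, b, c] rfl

theorem runH_nil_spec (ts : List Int) (hp : ts.Pairwise (· ≤ ·)) :
    QH (runH [] ts) (firstTriple ts) := by
  cases ts with
  | nil => rw [firstTriple_short _ (by simp)]; simp [QH, runH]
  | cons t ts' =>
    have h1 : runH [] (t :: ts') = runH [t] ts' := by
      show runH (stepH [] t) ts' = _
      simp [stepH, popLoopA, heappushA]
    rw [h1]
    exact (core ts').1 t hp

-- ---- the sort: sorted2 on pairs is sorted with the lexicographic key ----

theorem sorted2_eq_sorted_lex (xs : List (String × Int)) :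
    PySem.List.sorted2 xs (fun p => p.1) (fun p => p.2) =
    PySem.List.sorted xs (fun p => (toLex p : Lex (String × Int))) := by
  unfold PySem.List.sorted2 PySem.List.sorted
  simp only [Bool.false_eq_true, if_false]
  congr 1
  funext acc p
  congr 1
  funext x y
  rw [Bool.eq_iff_iff]
  simp only [Bool.or_eq_true, Bool.and_eq_true, Bool.not_eq_true', decide_eq_true_eq,
    decide_eq_false_iff_not, Prod.Lex.lt_iff, ofLex_toLex]
  constructor
  · rintro (h | ⟨h2, h3⟩)
    · exact Or.inl h
    · rcases lt_or_eq_of_le (not_lt.mp h2) with h | h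
      · exact Or.inl h
      · exact Or.inr ⟨h, h3⟩
  · rintro (h | ⟨he, h3⟩)
    · exact Or.inl h
    · exact Or.inr ⟨by rw [he]; exact lt_irrefl _, h3⟩

theorem grpT_pairwise (bt : List (String × Int)) (k : String) :
    (grpT (PySem.List.sorted2 bt (fun p => p.1) (fun p => p.2)) k).Pairwise (· ≤ ·) := by
  rw [sorted2_eq_sorted_lex]
  have hs := PySem.List.sorted_pairwise bt (fun p => (toLex p : Lex (String × Int)))
  unfold grpT
  rw [List.pairwise_map]
  refine List.Pairwise.imp_of_mem ?_ (List.Pairwise.sublist List.filter_sublist hs)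
  intro p q hpm hqm hle
  have hp1 : p.1 = k := by simpa using (List.mem_filter.mp hpm).2
  have hq1 : q.1 = k := by simpa using (List.mem_filter.mp hqm).2
  rcases Prod.Lex.le_iff.mp hle with h | h
  · exact absurd (hp1 ▸ hq1 ▸ h) (lt_irrefl _)
  · exact h.2

-- ---- dict-fold characterizations ----

def stepA (m : PySem.Dict String (List Int)) (bt : String × Int) : PySem.Dict String (List Int) :=
  let employee := bt.1
  let time := bt.2
  let h := m.getD employee []
  let m1 := if m.contains employee then m else m.insert employee []
  if h.length < 3 then m1.insert employee (heappushA (popLoopA time h) time) else m1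

theorem stepA_getD (m : PySem.Dict String (List Int)) (p : String × Int) (k : String) :
    (stepA m p).getD k [] = if p.1 == k then stepH (m.getD k []) p.2 else m.getD k [] := by
  by_cases hk : p.1 = k
  · subst hk
    simp only [stepA, stepH, beq_self_eq_true, if_true]
    by_cases hc : m.contains p.1 = true
    · simp only [hc, if_true]
      split
      · rw [PySem.Dict.getD_insert_self]
      · rfl
    · have hnc : m.contains p.1 = false := by simpa using hc
      have hd : m.getD p.1 [] = [] := PySem.Dict.getD_of_not_contains m [] hnc
      simp only [hnc, Bool.false_eq_true, if_false, hd, List.length_nil]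
      rw [if_pos (by norm_num), if_pos (by norm_num), PySem.Dict.getD_insert_self]
  · have hne : k ≠ p.1 := fun h => hk h.symm
    have hbeq : (p.1 == k) = false := by simpa using hk
    simp only [stepA, hbeq, Bool.false_eq_true, if_false]
    split <;> split <;>
      simp [PySem.Dict.getD_insert_of_ne _ _ _ hne]

theorem foldA_getD (s : List (String × Int)) :
    ∀ (m : PySem.Dict String (List Int)) (k : String),
      (s.foldl stepA m).getD k [] = runH (m.getD k []) (grpT s k) := by
  induction s with
  | nil => intro m k; rfl
  | cons p rest ih =>
    intro m k
    show (rest.foldl stepA (stepA m p)).getD k [] = _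
    rw [ih (stepA m p) k, stepA_getD]
    unfold grpT
    simp only [List.filter_cons]
    by_cases h : (p.1 == k) = true
    · simp only [h, if_true, List.map_cons]
      rfl
    · have h' : (p.1 == k) = false := by simpa using h
      simp only [h', Bool.false_eq_true, if_false]

theorem stepA_keys (m : PySem.Dict String (List Int)) (p : String × Int) :
    (stepA m p).keys = PySem.Set.add m.keys p.1 := by
  dsimp only [stepA]
  by_cases hc : m.contains p.1 = true
  · have hmem : p.1 ∈ m.keys := (PySem.Dict.contains_iff_mem_keys m p.1).mp hc
    have hadd : PySem.Set.add m.keys p.1 = m.keys := by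
      unfold PySem.Set.add
      rw [if_pos (by simp [PySem.Set.contains, hmem])]
    rw [hadd, if_pos hc]
    split
    · exact PySem.Dict.keys_insert_of_contains m _ hc
    · rfl
  · have hnc : m.contains p.1 = false := by simpa using hc
    have hnm : p.1 ∉ m.keys := fun hmem => by
      rw [(PySem.Dict.contains_iff_mem_keys m p.1).mpr hmem] at hnc; cases hnc
    have hadd : PySem.Set.add m.keys p.1 = m.keys ++ [p.1] := by
      unfold PySem.Set.add
      rw [if_neg (by simp [PySem.Set.contains, hnm])]
    rw [hadd, if_neg hc]
    rw [PySem.Dict.getD_of_not_contains m [] hnc]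
    rw [if_pos (by norm_num : ([] : List Int).length < 3)]
    rw [PySem.Dict.keys_insert_of_contains _ _ (PySem.Dict.contains_insert_self m p.1 [])]
    exact PySem.Dict.keys_insert_of_not_contains m [] hnc

theorem foldA_keys (s : List (String × Int)) :
    ∀ (m : PySem.Dict String (List Int)),
      (s.foldl stepA m).keys = PySem.Set.update m.keys (s.map (fun p => p.1)) := by
  induction s with
  | nil => intro m; rfl
  | cons p rest ih =>
    intro m
    show (rest.foldl stepA (stepA m p)).keys = _
    rw [ih, stepA_keys]
    rfl

-- the result-building loop over items with fresh distinct keys is a filter + map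
theorem result_fold_filter {ν : Type} (l : List (String × ν)) (p : String × ν → Prop)
    [DecidablePred p] (v : String × ν → ν) (hnd : (l.map Prod.fst).Nodup) :
    (l.foldl (fun r q => if p q then r.insert q.1 (v q) else r)
        (PySem.Dict.empty : PySem.Dict String ν)).items
      = (l.filter (fun q => decide (p q))).map (fun q => (q.1, v q)) := by
  rw [PySem.List.foldl_ite_eq_foldl_filter p
    (fun (r : PySem.Dict String ν) (q : String × ν) => r.insert q.1 (v q)) l]
  have hsub : (l.filter (fun q => decide (p q))).Sublist l := List.filter_sublist
  have hnd' : ((l.filter (fun q => decide (p q))).map Prod.fst).Nodup :=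
    List.Nodup.sublist (hsub.map Prod.fst) hnd
  simpa using PySem.Dict.items_foldl_insert_fresh (l.filter (fun q => decide (p q)))
    Prod.fst (fun q => v q) PySem.Dict.empty (fun a _ => by simp) hnd'

-- ===== VERDICT helper: main equivalence on a nonempty input =====

theorem QH_len (h : List Int) (o : Option (List Int)) (hq : QH h o)
    (ho : ∀ w, o = some w → w.length = 3) :
    (decide (3 ≤ h.length) = o.isSome) ∧ (∀ w, o = some w → h = w) := by
  cases o with
  | none =>
    simp only [QH] at hq
    refine ⟨by simp; omega, ?_⟩
    intro w hw; cases hw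
  | some w =>
    simp only [QH] at hq
    have h3 := ho w rfl
    constructor
    · simp [hq, h3]
    · intro w' hw'; cases hw'; exact hq

theorem main_equiv (bt : List (String × Int)) :
    find_employee bt = find_employee_alt bt := by
  by_cases hbt : bt = []
  · subst hbt; rfl
  · unfold find_employee find_employee_alt
    rw [if_neg hbt]
    have hstepA : (fun (m : PySem.Dict String (List Int)) (bt : String × Int) =>
        let employee := bt.1
        let time := bt.2
        let h := m.getD employee []
        let m1 := if m.contains employee then m else m.insert employee []
        if h.length < 3 then m1.insert employee (heappushA (popLoopA time h) time) else m1)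
        = stepA := rfl
    rw [hstepA]
    dsimp only
    set s := PySem.List.sorted2 bt (fun p => p.1) (fun p => p.2) with hs
    set K : List String := PySem.Set.ofList (s.map (fun p => p.1)) with hK
    have hndK : K.Nodup := PySem.Set.nodup_ofList _
    -- A's employee_map
    have hkeysA : (s.foldl stepA PySem.Dict.empty).keys = K := by
      rw [foldA_keys]; rfl
    have hitemsA : (s.foldl stepA PySem.Dict.empty).items
        = K.map (fun k => (k, runH [] (grpT s k))) := by
      rw [PySem.Dict.items_eq_map_keys _ (hkeysA ▸ hndK) [], hkeysA]
      refine List.map_congr_left (fun k _ => ?_)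
      rw [foldA_getD]
      rfl
    -- B's groups
    have hkeysB : (s.foldl (fun g p => g.modify p.1 [] (fun ts => ts ++ [p.2]))
        PySem.Dict.empty).keys = K := by
      rw [PySem.Dict.keys_foldl_modify_key s (fun p => p.1) []
        (fun _ p => fun ts => ts ++ [p.2]) PySem.Dict.empty]
      rfl
    have hitemsB : (s.foldl (fun g p => g.modify p.1 [] (fun ts => ts ++ [p.2]))
        PySem.Dict.empty).items = K.map (fun k => (k, grpT s k)) := by
      rw [PySem.Dict.items_eq_map_keys _ (hkeysB ▸ hndK) [], hkeysB]
      refine List.map_congr_left (fun k _ => ?_)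
      rw [PySem.Dict.getD_foldl_modify_append s PySem.Dict.empty k]
      rfl
    rw [hitemsA, hitemsB]
    -- rewrite B's match-step as an if-step
    have hBstep : (fun (r : PySem.Dict String (List Int)) (p : String × List Int) =>
        match firstTriple p.2 with
        | some w => r.insert p.1 w
        | none => r)
        = (fun r p => if (firstTriple p.2).isSome
            then r.insert p.1 ((firstTriple p.2).getD []) else r) := by
      funext r p
      cases hft : firstTriple p.2 <;> simp
    rw [hBstep]
    -- both result loops are filters over maps with nodup keys
    have hndA : ((K.map (fun k => (k, runH [] (grpT s k)))).map Prod.fst).Nodup := by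
      rw [List.map_map,
        show (Prod.fst ∘ fun (k : String) => (k, runH [] (grpT s k))) = id from rfl,
        List.map_id]
      exact hndK
    have hndB : ((K.map (fun k => (k, grpT s k))).map Prod.fst).Nodup := by
      rw [List.map_map,
        show (Prod.fst ∘ fun (k : String) => (k, grpT s k)) = id from rfl,
        List.map_id]
      exact hndK
    rw [result_fold_filter _ (fun q => 3 ≤ q.2.length) Prod.snd hndA]
    rw [result_fold_filter _ (fun q => ((firstTriple q.2).isSome : Bool) = true)
      (fun q => (firstTriple q.2).getD []) hndB]
    rw [List.filter_map, List.filter_map]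
    rw [List.map_map, List.map_map]
    -- per-employee facts
    have hQ : ∀ k : String, (decide (3 ≤ (runH [] (grpT s k)).length)
          = (firstTriple (grpT s k)).isSome)
        ∧ (∀ w, firstTriple (grpT s k) = some w → runH [] (grpT s k) = w) := by
      intro k
      exact QH_len _ _ (runH_nil_spec _ (grpT_pairwise bt k))
        (fun w hw => firstTriple_some_length _ w hw)
    -- the two filters pick the same keys
    have hfilter : K.filter ((fun q => decide (3 ≤ q.2.length))
          ∘ (fun k => (k, runH [] (grpT s k))))
        = K.filter ((fun q => decide (((firstTriple q.2).isSome : Bool) = true))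
          ∘ (fun k => (k, grpT s k))) := by
      refine List.filter_congr (fun k _ => ?_)
      simp only [Function.comp]
      rw [(hQ k).1]
      simp
    rw [hfilter]
    refine List.map_congr_left (fun k hk => ?_)
    have hsome : (firstTriple (grpT s k)).isSome = true := by
      have := List.of_mem_filter hk
      simpa using this
    obtain ⟨w, hw⟩ := Option.isSome_iff_exists.mp hsome
    simp only [Function.comp]
    rw [(hQ k).2 w hw, hw]
    rfl

-- ===== VERDICT (by name: the statement is the Claim_ definition above) =====
theorem find_employee_spec : Claim_equal_find_employee := by
  intro bt _
  show find_employee bt = find_employee_alt bt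
  exact main_equiv bt
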